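-- pv_equiv track=rewrite | github.com/project-rig/nengo_spinnaker | nengo_spinnaker/utils/ccf.py | _count_bits
-- ===== SOURCE A (Python) =====
-- def _count_bits(entries):
--     xs = [False for _ in range(32)]
--     zeros = [0 for _ in range(32)]
--     ones = [0 for _ in range(32)]
--
--     for key, mask in entries:
--         for i in range(32):
--             bit = 1 << i
--
--             if mask & bit:
--                 if not key & bit:
--                     zeros[i] += 1
--                 else:
--                     ones[i] += 1
--             else:
--                 xs[i] = True
--
--     return tuple(xs), tuple(zeros), tuple(ones)
-- ===== SOURCE B (Python) =====
-- def _count_bits(entries):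
--     entries = list(entries)
--     xs = tuple(any(not mask & (1 << i) for key, mask in entries)
--                for i in range(32))
--     zeros = tuple(sum(1 for key, mask in entries
--                       if mask & (1 << i) and not key & (1 << i))
--                   for i in range(32))
--     ones = tuple(sum(1 for key, mask in entries
--                      if mask & (1 << i) and key & (1 << i))
--                  for i in range(32))
--     return xs, zeros, ones
-- ===== Notes on version B (the rewrite author's own statement) =====
-- stated objective: alternative
-- what changed: A does one entry-major pass updating all three 32-slot accumulator arrays in a nested loop; B materializes the entries and computes each of the three 32-tuples with its own independent bit-major comprehension (any / sum-count per bit position).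
import Mathlib
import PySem

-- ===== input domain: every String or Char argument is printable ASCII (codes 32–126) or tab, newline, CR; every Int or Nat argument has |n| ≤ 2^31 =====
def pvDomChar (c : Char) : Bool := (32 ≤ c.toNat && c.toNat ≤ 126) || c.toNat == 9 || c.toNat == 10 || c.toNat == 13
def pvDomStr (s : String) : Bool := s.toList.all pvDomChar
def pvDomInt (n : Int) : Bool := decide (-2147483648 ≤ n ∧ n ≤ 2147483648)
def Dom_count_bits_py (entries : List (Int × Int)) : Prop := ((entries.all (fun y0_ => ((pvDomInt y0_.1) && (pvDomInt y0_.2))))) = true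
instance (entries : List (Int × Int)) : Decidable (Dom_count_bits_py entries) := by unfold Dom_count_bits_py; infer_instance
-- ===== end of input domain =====

-- B replaces A's single entry-major pass (mutating three 32-slot arrays) by three
-- independent bit-major scans (any / count per bit position); objective: alternative decomposition.


-- ===== PORT A =====
-- body of A's inner `for i in range(32)` loop (nested ifs in source order)
def countBitsInnerA (e : Int × Int) (st : List Bool × List Int × List Int) (i : Nat) :
    List Bool × List Int × List Int :=
  let bit : Int := (1 : Int) <<< i
  if PySem.Int.band e.2 bit ≠ 0 then
    if PySem.Int.band e.1 bit = 0 then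
      (st.1, st.2.1.set i (st.2.1.getD i 0 + 1), st.2.2)
    else
      (st.1, st.2.1, st.2.2.set i (st.2.2.getD i 0 + 1))
  else
    (st.1.set i true, st.2.1, st.2.2)

def count_bits_py (entries : List (Int × Int)) : List Bool × List Int × List Int :=
  entries.foldl (fun st e => (List.range 32).foldl (countBitsInnerA e) st)
    ((List.range 32).map fun _ => false,
     (List.range 32).map fun _ => (0 : Int),
     (List.range 32).map fun _ => (0 : Int))

-- ===== PORT B =====
def count_bits_py_alt (entries : List (Int × Int)) : List Bool × List Int × List Int :=
  ((List.range 32).map fun (i : Nat) =>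
      entries.any fun e => decide (PySem.Int.band e.2 ((1 : Int) <<< i) = 0),
   (List.range 32).map fun (i : Nat) =>
      ((entries.countP fun e =>
          decide (PySem.Int.band e.2 ((1 : Int) <<< i) ≠ 0 ∧
                  PySem.Int.band e.1 ((1 : Int) <<< i) = 0)) : Int),
   (List.range 32).map fun (i : Nat) =>
      ((entries.countP fun e =>
          decide (PySem.Int.band e.2 ((1 : Int) <<< i) ≠ 0 ∧
                  PySem.Int.band e.1 ((1 : Int) <<< i) ≠ 0)) : Int))

-- ===== PRECONDITION & SPEC =====
def Spec_count_bits_py (entries : List (Int × Int)) (out : List Bool × List Int × List Int) : Prop := out = count_bits_py_alt entries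
instance (entries : List (Int × Int)) (out : List Bool × List Int × List Int) : Decidable (Spec_count_bits_py entries out) := by unfold Spec_count_bits_py; infer_instance

-- ===== CLAIM (what is proved, stated in full; the proofs are below) =====
def Claim_equal_count_bits_py : Prop := ∀ (entries : List (Int × Int)), Dom_count_bits_py entries → Spec_count_bits_py entries (count_bits_py entries)

-- ===== LEMMAS AND PROOFS =====

-- canonical single-index update: conditionally set index i from its old value
def stepOf {α : Type} (d : α) (c : Nat → Bool) (u : Nat → α → α)
    (l : List α) (i : Nat) : List α :=
  if c i then l.set i (u i (l.getD i d)) else l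

-- the three column conditions of one entry
def cX (e : Int × Int) (i : Nat) : Bool := decide (PySem.Int.band e.2 ((1 : Int) <<< i) = 0)
def cZ (e : Int × Int) (i : Nat) : Bool :=
  decide (PySem.Int.band e.2 ((1 : Int) <<< i) ≠ 0 ∧ PySem.Int.band e.1 ((1 : Int) <<< i) = 0)
def cO (e : Int × Int) (i : Nat) : Bool :=
  decide (PySem.Int.band e.2 ((1 : Int) <<< i) ≠ 0 ∧ PySem.Int.band e.1 ((1 : Int) <<< i) ≠ 0)

lemma inner_split (e : Int × Int) (st : List Bool × List Int × List Int) (i : Nat) :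
    countBitsInnerA e st i =
      (stepOf false (cX e) (fun _ _ => true) st.1 i,
       stepOf 0 (cZ e) (fun _ a => a + 1) st.2.1 i,
       stepOf 0 (cO e) (fun _ a => a + 1) st.2.2 i) := by
  unfold countBitsInnerA stepOf cX cZ cO
  by_cases hm : PySem.Int.band e.2 ((1 : Int) <<< i) = 0 <;>
    by_cases hk : PySem.Int.band e.1 ((1 : Int) <<< i) = 0 <;>
    simp [hm, hk]

lemma foldl_prod3 {α β γ ι : Type} (f : α → ι → α) (g : β → ι → β) (h : γ → ι → γ) :
    ∀ (l : List ι) (a : α) (b : β) (c : γ),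
      l.foldl (fun st i => (f st.1 i, g st.2.1 i, h st.2.2 i)) (a, b, c) =
        (l.foldl f a, l.foldl g b, l.foldl h c) := by
  intro l
  induction l with
  | nil => intro a b c; rfl
  | cons x xs ih => intro a b c; simp [List.foldl_cons, ih]

lemma pass_map {α : Type} (d : α) (c : Nat → Bool) (u : Nat → α → α)
    (N : Nat) (f : Nat → α) :
    ∀ n, n ≤ N →
      (List.range n).foldl (stepOf d c u) ((List.range N).map f) =
        (List.range N).map (fun i => if i < n ∧ c i then u i (f i) else f i) := by
  intro n
  induction n with
  | zero =>
    intro _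
    refine List.map_congr_left ?_
    intro i _; simp
  | succ n ih =>
    intro hle
    have hnN : n < N := by omega
    rw [List.range_succ, List.foldl_append, ih (by omega)]
    set g : Nat → α := fun i => if i < n ∧ c i then u i (f i) else f i with hg
    have hget : ((List.range N).map g).getD n d = g n := by
      simp [List.getD, hnN]
    by_cases hc : c n
    · simp only [List.foldl_cons, List.foldl_nil, stepOf, hc, if_pos, hget]
      apply List.ext_getElem
      · simp
      · intro i hi1 hi2
        simp only [List.getElem_set, List.getElem_map, List.getElem_range]
        have hiN : i < N := by simpa using hi2
        by_cases hin : n = i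
        · subst hin
          simp [hg, hc]
        · have : ¬ (i = n) := fun h => hin h.symm
          simp only [if_neg hin, hg]
          by_cases hi' : i < n
          · simp [hi', show i < n + 1 by omega]
          · have h1 : ¬ (i < n ∧ c i) := fun h => hi' h.1
            have h2 : ¬ (i < n + 1 ∧ c i) := by
              rintro ⟨h3, h4⟩
              exact h1 ⟨by omega, h4⟩
            rw [if_neg h1, if_neg h2]
    · simp only [List.foldl_cons, List.foldl_nil, stepOf, hc]
      refine List.map_congr_left ?_
      intro i hi
      have hiN : i < N := List.mem_range.mp hi
      simp only [hg]
      by_cases hin : i = n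
      · subst hin; simp [hc]
      · by_cases hi' : i < n
        · simp [hi', show i < n + 1 by omega]
        · have h1 : ¬ (i < n ∧ c i) := fun h => hi' h.1
          have h2 : ¬ (i < n + 1 ∧ c i) := by
            rintro ⟨h3, h4⟩
            exact h1 ⟨by omega, h4⟩
          rw [if_neg h1, if_neg h2]

lemma outer_map {α : Type} (d : α) (C : (Int × Int) → Nat → Bool)
    (u : Nat → α → α) :
    ∀ (es : List (Int × Int)) (f : Nat → α),
      es.foldl (fun l e => (List.range 32).foldl (stepOf d (C e) u) l) ((List.range 32).map f) =
        (List.range 32).map (fun i => es.foldl (fun a e => if C e i then u i a else a) (f i)) := by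
  intro es
  induction es with
  | nil => intro f; rfl
  | cons e es ih =>
    intro f
    rw [List.foldl_cons, pass_map d (C e) u 32 f 32 (le_refl _)]
    have h1 : (List.range 32).map (fun i => if i < 32 ∧ C e i then u i (f i) else f i) =
        (List.range 32).map (fun i => if C e i then u i (f i) else f i) := by
      refine List.map_congr_left ?_
      intro i hi
      have : i < 32 := List.mem_range.mp hi
      by_cases hc : C e i <;> simp [hc, this]
    rw [h1, ih]
    simp [List.foldl_cons]

lemma foldl_orr {α : Type} (p : α → Bool) :
    ∀ (es : List α) (b : Bool),
      es.foldl (fun a e => if p e then true else a) b = (b || es.any p) := by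
  intro es
  induction es with
  | nil => intro b; simp
  | cons e es ih =>
    intro b
    rw [List.foldl_cons]
    cases hp : p e
    · rw [if_neg (by simp [hp]), ih, List.any_cons, hp]
      simp
    · rw [if_pos (by simp [hp]), ih, List.any_cons, hp]
      simp

lemma foldl_count {α : Type} (p : α → Bool) :
    ∀ (es : List α) (a : Int),
      es.foldl (fun a e => if p e then a + 1 else a) a =
        a + ((es.countP p) : Int) := by
  intro es
  induction es with
  | nil => intro a; simp
  | cons e es ih =>
    intro a
    by_cases hp : p e <;> simp [hp, ih] <;> ring

-- ===== VERDICT (by name: the statement is the Claim_ definition above) =====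
theorem count_bits_py_spec : Claim_equal_count_bits_py := by
  unfold Claim_equal_count_bits_py
  intro entries _
  unfold Spec_count_bits_py count_bits_py count_bits_py_alt
  have hinner : ∀ (e : Int × Int) (st : List Bool × List Int × List Int),
      (List.range 32).foldl (countBitsInnerA e) st =
        ((List.range 32).foldl (stepOf false (cX e) (fun _ _ => true)) st.1,
         (List.range 32).foldl (stepOf 0 (cZ e) (fun _ a => a + 1)) st.2.1,
         (List.range 32).foldl (stepOf 0 (cO e) (fun _ a => a + 1)) st.2.2) := by
    intro e ⟨a, b, c⟩
    have : countBitsInnerA e = fun st i =>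
        (stepOf false (cX e) (fun _ _ => true) st.1 i,
         stepOf 0 (cZ e) (fun _ a => a + 1) st.2.1 i,
         stepOf 0 (cO e) (fun _ a => a + 1) st.2.2 i) := by
      funext st i; exact inner_split e st i
    rw [this, foldl_prod3]
  have hsplit :
      entries.foldl (fun st e => (List.range 32).foldl (countBitsInnerA e) st)
        ((List.range 32).map fun _ => false,
         (List.range 32).map fun _ => (0 : Int),
         (List.range 32).map fun _ => (0 : Int)) =
      (entries.foldl (fun l e => (List.range 32).foldl (stepOf false (cX e) (fun _ _ => true)) l)
         ((List.range 32).map fun _ => false),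
       entries.foldl (fun l e => (List.range 32).foldl (stepOf 0 (cZ e) (fun _ a => a + 1)) l)
         ((List.range 32).map fun _ => (0 : Int)),
       entries.foldl (fun l e => (List.range 32).foldl (stepOf 0 (cO e) (fun _ a => a + 1)) l)
         ((List.range 32).map fun _ => (0 : Int))) := by
    have : (fun (st : List Bool × List Int × List Int) (e : Int × Int) =>
        (List.range 32).foldl (countBitsInnerA e) st) = fun st e =>
        ((List.range 32).foldl (stepOf false (cX e) (fun _ _ => true)) st.1,
         (List.range 32).foldl (stepOf 0 (cZ e) (fun _ a => a + 1)) st.2.1,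
         (List.range 32).foldl (stepOf 0 (cO e) (fun _ a => a + 1)) st.2.2) := by
      funext st e; exact hinner e st
    rw [this]
    exact foldl_prod3
      (fun l e => (List.range 32).foldl (stepOf false (cX e) (fun _ _ => true)) l)
      (fun l e => (List.range 32).foldl (stepOf 0 (cZ e) (fun _ a => a + 1)) l)
      (fun l e => (List.range 32).foldl (stepOf 0 (cO e) (fun _ a => a + 1)) l)
      entries _ _ _
  rw [hsplit, outer_map, outer_map, outer_map]
  refine Prod.ext ?_ (Prod.ext ?_ ?_) <;> dsimp only
  · refine List.map_congr_left ?_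
    intro i _
    rw [show (fun (a : Bool) (e : Int × Int) => if cX e i then (fun _ _ => true) i a else a) =
        fun a e => if cX e i then true else a from rfl]
    rw [foldl_orr (fun e => cX e i) entries false]
    simp only [Bool.false_or]
    rfl
  · refine List.map_congr_left ?_
    intro i _
    rw [show (fun (a : Int) (e : Int × Int) => if cZ e i then (fun _ a => a + 1) i a else a) =
        fun a e => if cZ e i then a + 1 else a from rfl]
    rw [foldl_count (fun e => cZ e i) entries 0]
    simp only [zero_add]
    rfl
  · refine List.map_congr_left ?_
    intro i _
    rw [show (fun (a : Int) (e : Int × Int) => if cO e i then (fun _ a => a + 1) i a else a) =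
        fun a e => if cO e i then a + 1 else a from rfl]
    rw [foldl_count (fun e => cO e i) entries 0]
    simp only [zero_add]
    rfl
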